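-- pv_equiv track=rewrite | github.com/yanagi7393/auto-trader | 0_AE_CNN_ArLSTM_model/1_trading/002_for_backtest.py | calc_count_change
-- ===== SOURCE A (Python) =====
-- coin_count = 6
--
-- def calc_count_change(for_calc_1m, for_calc_5m):
--
--     calc_global_num = 0
--     for calc_target in [for_calc_1m, for_calc_5m]:
--         state_count = 0
--
--         for lis in calc_target:
--             if lis >= 0:
--                 state_count += 1
--
--         if (state_count > coin_count//2) and calc_global_num == 0:
--             change_1m = 'UP'
--         elif (state_count > coin_count//2) and calc_global_num == 1:
--             change_5m = 'UP'
--
--         elif (state_count == coin_count//2) and calc_global_num == 0: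
--             change_1m = 'SAME'
--         elif (state_count == coin_count//2) and calc_global_num == 1:
--             change_5m = 'SAME'
--
--         elif (state_count < coin_count//2) and calc_global_num == 0:
--             change_1m = 'DOWN'
--         elif (state_count < coin_count//2) and calc_global_num == 1:
--             change_5m = 'DOWN'
--
--         calc_global_num += 1
--
--     return change_1m, change_5m
-- ===== SOURCE B (Python) =====
-- def calc_count_change(for_calc_1m, for_calc_5m):
--     # Order-statistic approach: sort descending; the verdict is determined by
--     # the sign of the 4th-largest (UP iff >= 0) and 3rd-largest (SAME iff >= 0).
--     def label(lst):
--         s = sorted(lst, reverse=True)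
--         if len(s) > 3 and s[3] >= 0:
--             return 'UP'
--         if len(s) > 2 and s[2] >= 0:
--             return 'SAME'
--         return 'DOWN'
--     return label(for_calc_1m), label(for_calc_5m)
-- ===== Notes on version B (the rewrite author's own statement) =====
-- stated objective: alternative
-- what changed: Replaces A's combined counting loop with index-accumulator dispatch by an order-statistic method: each list is sorted descending and the label read off the signs of its 4th- and 3rd-largest elements (count of non-negatives exceeds 3 iff the 4th-largest is non-negative), so no count is ever computed.
import Mathlib
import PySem

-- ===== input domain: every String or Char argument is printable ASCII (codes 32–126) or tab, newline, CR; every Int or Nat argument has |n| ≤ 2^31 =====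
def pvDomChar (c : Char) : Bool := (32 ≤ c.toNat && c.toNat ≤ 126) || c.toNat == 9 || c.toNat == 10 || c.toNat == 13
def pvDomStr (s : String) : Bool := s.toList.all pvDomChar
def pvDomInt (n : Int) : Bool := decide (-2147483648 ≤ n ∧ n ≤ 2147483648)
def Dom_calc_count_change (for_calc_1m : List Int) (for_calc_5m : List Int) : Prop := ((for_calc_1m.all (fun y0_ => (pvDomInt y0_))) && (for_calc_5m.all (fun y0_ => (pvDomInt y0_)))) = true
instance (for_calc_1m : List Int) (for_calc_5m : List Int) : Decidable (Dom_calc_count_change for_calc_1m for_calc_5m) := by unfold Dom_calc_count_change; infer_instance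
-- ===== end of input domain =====

-- B replaces A's counting loop with an order-statistic method (sort descending,
-- read the label off the signs of the 4th- and 3rd-largest elements); alternative, not faster.


-- ===== PORT A =====
-- Literal port of A: fold over the two-element list with state
-- (calc_global_num, change_1m, change_5m); inner loop counts non-negatives.
def calc_count_change (for_calc_1m : List Int) (for_calc_5m : List Int) : String × String :=
  let st := [for_calc_1m, for_calc_5m].foldl (fun (acc : Int × String × String) calc_target =>
    let calc_global_num := acc.1
    let state_count : Int := calc_target.foldl (fun s lis => if lis ≥ 0 then s + 1 else s) 0
    let acc :=
      if state_count > 6 / 2 ∧ calc_global_num = 0 then (acc.1, "UP", acc.2.2)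
      else if state_count > 6 / 2 ∧ calc_global_num = 1 then (acc.1, acc.2.1, "UP")
      else if state_count = 6 / 2 ∧ calc_global_num = 0 then (acc.1, "SAME", acc.2.2)
      else if state_count = 6 / 2 ∧ calc_global_num = 1 then (acc.1, acc.2.1, "SAME")
      else if state_count < 6 / 2 ∧ calc_global_num = 0 then (acc.1, "DOWN", acc.2.2)
      else if state_count < 6 / 2 ∧ calc_global_num = 1 then (acc.1, acc.2.1, "DOWN")
      else acc
    (acc.1 + 1, acc.2)) ((0 : Int), "", "")
  (st.2.1, st.2.2)

-- ===== PORT B =====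
-- Port of B: sort descending, label from the 4th- and 3rd-largest elements.
-- 'len(s) > 3 and s[3] >= 0' is ported as pyGet? returning some x with 0 ≤ x.
def pvLabel (lst : List Int) : String :=
  let s := PySem.List.sorted lst (fun x => x) true
  if (PySem.List.pyGet? s 3).elim false (fun x => decide (0 ≤ x)) then "UP"
  else if (PySem.List.pyGet? s 2).elim false (fun x => decide (0 ≤ x)) then "SAME"
  else "DOWN"

def calc_count_change_alt (for_calc_1m : List Int) (for_calc_5m : List Int) : String × String :=
  (pvLabel for_calc_1m, pvLabel for_calc_5m)

-- ===== PRECONDITION & SPEC =====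
def Spec_calc_count_change (for_calc_1m : List Int) (for_calc_5m : List Int) (out : String × String) : Prop := out = calc_count_change_alt for_calc_1m for_calc_5m
instance (for_calc_1m : List Int) (for_calc_5m : List Int) (out : String × String) : Decidable (Spec_calc_count_change for_calc_1m for_calc_5m out) := by unfold Spec_calc_count_change; infer_instance

-- ===== CLAIM (what is proved, stated in full; the proofs are below) =====
def Claim_equal_calc_count_change : Prop := ∀ (for_calc_1m : List Int) (for_calc_5m : List Int), Dom_calc_count_change for_calc_1m for_calc_5m → Spec_calc_count_change for_calc_1m for_calc_5m (calc_count_change for_calc_1m for_calc_5m)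

-- ===== LEMMAS AND PROOFS =====

-- A's inner counting loop computes countP (0 ≤ ·).
theorem pv_count_eq (l : List Int) :
    l.foldl (fun s lis => if lis ≥ 0 then s + 1 else s) 0 = (l.countP (fun x => decide (0 ≤ x)) : Int) := by
  suffices h : ∀ (s : Int), l.foldl (fun s lis => if lis ≥ 0 then s + 1 else s) s
      = s + (l.countP (fun x => decide (0 ≤ x)) : Int) by
    simpa using h 0
  induction l with
  | nil => simp
  | cons x xs ih =>
    intro s
    by_cases hx : x ≥ 0 <;> simp [hx, ih, ge_iff_le] <;> ring

-- In a descending list, the k-th element is non-negative iff more than k elements are non-negative.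
theorem pv_desc_get (s : List Int) (h : s.Pairwise (fun a b => b ≤ a)) (k : Nat) :
    ((s[k]?.elim false (fun x => decide (0 ≤ x))) = true) ↔ k < s.countP (fun x => decide (0 ≤ x)) := by
  induction s generalizing k with
  | nil => simp
  | cons a t ih =>
    rcases List.pairwise_cons.mp h with ⟨ha, ht⟩
    cases k with
    | zero =>
      by_cases h0 : (0 : Int) ≤ a
      · simp [h0]
      · have hz : t.countP (fun x => decide (0 ≤ x)) = 0 := by
          rw [List.countP_eq_zero]
          intro x hx
          simp only [decide_eq_true_eq]
          intro hcx
          exact h0 (le_trans hcx (ha x hx))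
        simp [h0, hz]
    | succ n =>
      by_cases h0 : (0 : Int) ≤ a
      · rw [List.getElem?_cons_succ, ih ht n]
        simp [h0]
      · have hz : t.countP (fun x => decide (0 ≤ x)) = 0 := by
          rw [List.countP_eq_zero]
          intro x hx
          simp only [decide_eq_true_eq]
          intro hcx
          exact h0 (le_trans hcx (ha x hx))
        simp only [List.getElem?_cons_succ, List.countP_cons, h0, decide_false]
        rw [ih ht n, hz]
        simp

-- B's label agrees with the countP trichotomy.
theorem pv_label_eq (l : List Int) :
    pvLabel l = (if 3 < l.countP (fun x => decide (0 ≤ x)) then "UP"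
      else if l.countP (fun x => decide (0 ≤ x)) = 3 then "SAME" else "DOWN") := by
  unfold pvLabel
  have hperm := PySem.List.sorted_perm l (fun x => x) true
  have hpw := PySem.List.sorted_pairwise_rev l (fun x => x)
  have hc : (PySem.List.sorted l (fun x => x) true).countP (fun x => decide (0 ≤ x))
      = l.countP (fun x => decide (0 ≤ x)) := hperm.countP_eq _
  have h3 := pv_desc_get _ hpw 3
  have h2 := pv_desc_get _ hpw 2
  rw [hc] at h3 h2
  simp only [show ((3:Int)) = ((3:Nat):Int) from rfl, show ((2:Int)) = ((2:Nat):Int) from rfl,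
    PySem.List.pyGet?_natCast]
  simp only [h3, h2]
  split_ifs <;> first | rfl | (exfalso; omega)

-- ===== VERDICT (by name: the statement is the Claim_ definition above) =====
theorem calc_count_change_spec : Claim_equal_calc_count_change := by
  intro l1 l2 _
  unfold Spec_calc_count_change calc_count_change calc_count_change_alt
  simp only [List.foldl, pv_count_eq, pv_label_eq]
  simp only [apply_ite Prod.fst, apply_ite Prod.snd, ite_self]
  norm_num
  constructor <;> (split_ifs <;> first | rfl | (exfalso; omega))
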